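-- pv_equiv track=rewrite | github.com/MARTINS2309/auto-gamer | logic/learn/analyst.py | _count_scene_actions
-- ===== SOURCE A (Python) =====
-- from typing import Optional, Dict, List, Tuple, Any
--
-- def _count_scene_actions(entries: list) -> Dict[str, Dict[str, int]]:
--     """Count actions taken in each scene."""
--     counts = {}
--     for entry in entries:
--         scene = entry.get("scene", "unknown")
--         action = entry.get("action", "unknown")
--
--         if scene not in counts:
--             counts[scene] = {}
--         if action not in counts[scene]:
--             counts[scene][action] = 0
--         counts[scene][action] += 1
--
--     return counts
-- ===== SOURCE B (Python) =====
-- from typing import Dict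
--
--
-- def _count_scene_actions(entries: list) -> Dict[str, Dict[str, int]]:
--     """Count actions taken in each scene: flat tuple-keyed tally, then reshape."""
--     flat = {}
--     for entry in entries:
--         key = (entry.get("scene", "unknown"), entry.get("action", "unknown"))
--         flat[key] = flat.get(key, 0) + 1
--
--     counts = {}
--     for (scene, action), n in flat.items():
--         counts.setdefault(scene, {})[action] = n
--     return counts
-- ===== Notes on version B (the rewrite author's own statement) =====
-- stated objective: alternative
-- what changed: Replaces A's directly-nested dict accumulation with a single flat (scene, action)-tuple-keyed tally built in one pass and then reshaped into the nested dict in a second pass over the flat table.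
import Mathlib
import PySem

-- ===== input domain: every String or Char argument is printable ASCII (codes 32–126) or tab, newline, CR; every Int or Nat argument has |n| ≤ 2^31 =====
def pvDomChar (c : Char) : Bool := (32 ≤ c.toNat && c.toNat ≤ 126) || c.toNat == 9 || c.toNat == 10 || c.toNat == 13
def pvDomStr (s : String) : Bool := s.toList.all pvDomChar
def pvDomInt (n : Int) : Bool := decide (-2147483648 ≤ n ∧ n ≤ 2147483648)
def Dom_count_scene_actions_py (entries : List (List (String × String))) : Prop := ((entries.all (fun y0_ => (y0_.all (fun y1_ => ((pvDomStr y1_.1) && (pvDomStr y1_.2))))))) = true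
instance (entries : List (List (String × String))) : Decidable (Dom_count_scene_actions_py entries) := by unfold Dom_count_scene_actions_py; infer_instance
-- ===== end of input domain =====

-- B replaces A's directly-nested dict accumulation by a flat (scene, action)-keyed tally
-- built in one pass and reshaped into the nested dict afterwards (objective: alternative).

-- ===== PORT A =====
def count_scene_actions_py (entries : List (List (String × String))) : List (String × List (String × Int)) :=
  let counts : PySem.Dict String (PySem.Dict String Int) :=
    entries.foldl (fun counts entry =>
      let scene := (PySem.Dict.mk entry).getD "scene" "unknown"
      let action := (PySem.Dict.mk entry).getD "action" "unknown"
      let counts := if counts.contains scene then counts else counts.insert scene PySem.Dict.empty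
      let inner := counts.getD scene PySem.Dict.empty
      let inner := if inner.contains action then inner else inner.insert action 0
      counts.insert scene (inner.insert action (inner.getD action 0 + 1))) PySem.Dict.empty
  counts.items.map (fun p => (p.1, p.2.items))

-- ===== PORT B =====
-- 'counts.setdefault(scene, {})[action] = n' is Dict.modify scene empty (insert action n):
-- both set counts[scene] to counts.get(scene, {}) with action bound to n (append on a fresh scene).
def count_scene_actions_py_alt (entries : List (List (String × String))) : List (String × List (String × Int)) :=
  let flat : PySem.Dict (String × String) Int :=
    entries.foldl (fun d entry =>
      let k := ((PySem.Dict.mk entry).getD "scene" "unknown",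
                (PySem.Dict.mk entry).getD "action" "unknown")
      d.insert k (d.getD k 0 + 1)) PySem.Dict.empty
  let counts : PySem.Dict String (PySem.Dict String Int) :=
    flat.items.foldl (fun counts p =>
      counts.modify p.1.1 PySem.Dict.empty (fun inner => inner.insert p.1.2 p.2)) PySem.Dict.empty
  counts.items.map (fun p => (p.1, p.2.items))

-- ===== PRECONDITION & SPEC =====
def Spec_count_scene_actions_py (entries : List (List (String × String))) (out : List (String × List (String × Int))) : Prop := out = count_scene_actions_py_alt entries
instance (entries : List (List (String × String))) (out : List (String × List (String × Int))) : Decidable (Spec_count_scene_actions_py entries out) := by unfold Spec_count_scene_actions_py; infer_instance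

-- ===== CLAIM (what is proved, stated in full; the proofs are below) =====
def Claim_equal_count_scene_actions_py : Prop := ∀ (entries : List (List (String × String))), Dom_count_scene_actions_py entries → Spec_count_scene_actions_py entries (count_scene_actions_py entries)

-- ===== LEMMAS AND PROOFS =====

-- the (scene, action) key a single entry contributes
def pvKey (e : List (String × String)) : String × String :=
  ((PySem.Dict.mk e).getD "scene" "unknown", (PySem.Dict.mk e).getD "action" "unknown")

-- A's loop body as a function of the key
def gA (c : PySem.Dict String (PySem.Dict String Int)) (k : String × String) :
    PySem.Dict String (PySem.Dict String Int) :=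
  let counts := if c.contains k.1 then c else c.insert k.1 PySem.Dict.empty
  let inner := counts.getD k.1 PySem.Dict.empty
  let inner2 := if inner.contains k.2 then inner else inner.insert k.2 0
  counts.insert k.1 (inner2.insert k.2 (inner2.getD k.2 0 + 1))

-- the same body as one nested modify
def mstep (c : PySem.Dict String (PySem.Dict String Int)) (k : String × String) :
    PySem.Dict String (PySem.Dict String Int) :=
  c.modify k.1 PySem.Dict.empty (fun i => i.modify k.2 0 (· + 1))

-- actions recorded for scene s, in order
def actOf (ks : List (String × String)) (s : String) : List String :=
  (ks.filter (fun k => k.1 == s)).map Prod.snd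

-- nested-dict shape both programs produce, as a function of the key list
def closedForm (ks : List (String × String)) : List (String × List (String × Int)) :=
  (PySem.Set.ofList (ks.map Prod.fst)).map
    (fun s => (s, (PySem.Dict.counter (actOf ks s)).items))

lemma gA_eq_mstep (c : PySem.Dict String (PySem.Dict String Int)) (k : String × String) :
    gA c k = mstep c k := by
  unfold gA mstep
  by_cases h1 : c.contains k.1 = true
  · simp only [h1, if_true]
    by_cases h2 : (c.getD k.1 PySem.Dict.empty).contains k.2 = true
    · simp only [h2, if_true]
      rfl
    · have h2' : (c.getD k.1 PySem.Dict.empty).contains k.2 = false := by simpa using h2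
      simp [h2', PySem.Dict.modify, PySem.Dict.getD_insert_self, PySem.Dict.insert_insert_self,
        PySem.Dict.getD_of_not_contains]
  · have h1' : c.contains k.1 = false := by simpa using h1
    simp [h1', PySem.Dict.modify, PySem.Dict.getD_insert_self, PySem.Dict.insert_insert_self,
      PySem.Dict.contains_empty, PySem.Dict.getD_of_not_contains]

lemma getD_foldl_mstep (ks : List (String × String)) (d : PySem.Dict String (PySem.Dict String Int)) (s : String) :
    (ks.foldl mstep d).getD s PySem.Dict.empty
      = (actOf ks s).foldl (fun i a => i.modify a 0 (· + 1)) (d.getD s PySem.Dict.empty) := by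
  induction ks generalizing d with
  | nil => rfl
  | cons k ks ih =>
    rw [List.foldl_cons, ih]
    unfold mstep actOf
    rw [PySem.Dict.getD_modify]
    by_cases h : k.1 = s
    · simp [h]
    · simp [h, Ne.symm h]

lemma A_closed (ks : List (String × String)) :
    (ks.foldl mstep PySem.Dict.empty).items.map (fun p => (p.1, p.2.items)) = closedForm ks := by
  have h0 : ks.foldl mstep PySem.Dict.empty
      = ks.foldl (fun c k => c.modify k.1 PySem.Dict.empty (fun i => i.modify k.2 0 (· + 1)))
          PySem.Dict.empty := rfl
  have hnd : (ks.foldl mstep PySem.Dict.empty).keys.Nodup := by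
    rw [h0]
    exact PySem.Dict.nodup_keys_foldl_modify_key ks (fun k => k.1) PySem.Dict.empty
      (fun _ k i => i.modify k.2 0 (· + 1)) PySem.Dict.empty (by simp)
  have hkeys : (ks.foldl mstep PySem.Dict.empty).keys = PySem.Set.ofList (ks.map Prod.fst) := by
    rw [h0]
    have h1 := PySem.Dict.keys_foldl_modify_key ks Prod.fst PySem.Dict.empty
      (fun (_ : PySem.Dict String (PySem.Dict String Int)) (k : String × String)
        (i : PySem.Dict String Int) => i.modify k.2 0 (· + 1)) PySem.Dict.empty
    simpa [PySem.Set.update_nil_left] using h1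
  rw [PySem.Dict.items_eq_map_keys _ hnd PySem.Dict.empty, List.map_map, hkeys]
  unfold closedForm
  apply List.map_congr_left
  intro s hs
  simp only [Function.comp]
  rw [getD_foldl_mstep, PySem.Dict.getD_empty]
  rfl

-- B's reshape loop body
def rstep (c : PySem.Dict String (PySem.Dict String Int)) (p : (String × String) × Int) :
    PySem.Dict String (PySem.Dict String Int) :=
  c.modify p.1.1 PySem.Dict.empty (fun inner => inner.insert p.1.2 p.2)

lemma getD_foldl_rstep (L : List ((String × String) × Int)) (d : PySem.Dict String (PySem.Dict String Int)) (s : String) :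
    (L.foldl rstep d).getD s PySem.Dict.empty
      = ((L.filter (fun p => p.1.1 == s)).map (fun p => (p.1.2, p.2))).foldl
          (fun i q => i.insert q.1 q.2) (d.getD s PySem.Dict.empty) := by
  induction L generalizing d with
  | nil => rfl
  | cons p L ih =>
    rw [List.foldl_cons, ih]
    unfold rstep
    rw [PySem.Dict.getD_modify]
    by_cases h : p.1.1 = s
    · simp [h]
    · simp [h, Ne.symm h]

-- dedup commutes with mapping over an already-deduplicated list
lemma ofList_map_ofList {α β : Type} [BEq α] [LawfulBEq α] [BEq β] [LawfulBEq β] (f : α → β) (l : List α) :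
    PySem.Set.ofList ((PySem.Set.ofList l).map f) = PySem.Set.ofList (l.map f) := by
  induction l using List.reverseRecOn with
  | nil => rfl
  | append_singleton l x ih =>
    rw [PySem.Set.ofList_append_singleton, List.map_append, List.map_singleton,
      PySem.Set.ofList_append_singleton]
    by_cases hx : x ∈ l
    · rw [PySem.Set.add_of_mem (by rw [PySem.Set.mem_ofList]; exact hx), ih,
        PySem.Set.add_of_mem (by rw [PySem.Set.mem_ofList]; exact List.mem_map_of_mem hx)]
    · rw [PySem.Set.add_of_not_mem (by rw [PySem.Set.mem_ofList]; exact hx),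
        List.map_append, List.map_singleton, PySem.Set.ofList_append_singleton, ih]

-- restricted to one scene, dedup of pairs is dedup of the actions
lemma filter_ofList_map_snd (ks : List (String × String)) (s : String) :
    ((PySem.Set.ofList ks).filter (fun k => k.1 == s)).map Prod.snd
      = PySem.Set.ofList (actOf ks s) := by
  induction ks using List.reverseRecOn with
  | nil => rfl
  | append_singleton l x ih =>
    unfold actOf at *
    rw [PySem.Set.ofList_append_singleton, List.filter_append, List.map_append]
    by_cases hpx : x.1 = s
    · have hfx : List.filter (fun k => k.1 == s) [x] = [x] := by simp [hpx]
      rw [hfx, List.map_singleton, PySem.Set.ofList_append_singleton]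
      by_cases hx : x ∈ l
      · rw [PySem.Set.add_of_mem (by rw [PySem.Set.mem_ofList]; exact hx), ih,
          PySem.Set.add_of_mem]
        rw [PySem.Set.mem_ofList]
        exact List.mem_map_of_mem (List.mem_filter.mpr ⟨hx, by simp [hpx]⟩)
      · rw [PySem.Set.add_of_not_mem (by rw [PySem.Set.mem_ofList]; exact hx),
          List.filter_append, hfx, List.map_append, List.map_singleton, ih,
          PySem.Set.add_of_not_mem]
        rw [PySem.Set.mem_ofList]
        intro hmem
        rcases List.mem_map.mp hmem with ⟨k, hk, hk2⟩
        rcases List.mem_filter.mp hk with ⟨hkl, hks⟩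
        have hks' : k.1 = s := by simpa using hks
        have : k = x := by
          apply Prod.ext
          · rw [hks', hpx]
          · exact hk2
        exact hx (this ▸ hkl)
    · have hfx : List.filter (fun k => k.1 == s) [x] = [] := by simp [hpx]
      rw [hfx, List.map_nil, List.append_nil]
      by_cases hx : x ∈ l
      · rw [PySem.Set.add_of_mem (by rw [PySem.Set.mem_ofList]; exact hx), ih]
      · rw [PySem.Set.add_of_not_mem (by rw [PySem.Set.mem_ofList]; exact hx),
          List.filter_append, hfx, List.append_nil, ih]

lemma count_actOf (ks : List (String × String)) (s a : String) :
    (actOf ks s).count a = ks.count (s, a) := by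
  induction ks with
  | nil => rfl
  | cons k ks ih =>
    unfold actOf at *
    rw [List.filter_cons]
    by_cases hk : k.1 = s
    · by_cases ha : k.2 = a
      · have : k = (s, a) := Prod.ext hk ha
        simp [this, ih]
      · have : k ≠ (s, a) := by
          intro h
          exact ha (by rw [h])
        simp [hk, ih, ha, this]
    · have : k ≠ (s, a) := by
        intro h
        exact hk (by rw [h])
      simp [hk, ih, this]

lemma B_closed (ks : List (String × String)) :
    (((PySem.Dict.counter ks).items.foldl rstep PySem.Dict.empty).items.map
        (fun p => (p.1, p.2.items))) = closedForm ks := by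
  have hitems : (PySem.Dict.counter ks).items
      = (PySem.Set.ofList ks).map (fun k => (k, (ks.count k : Int))) :=
    PySem.Dict.items_counter ks
  have h0 : (PySem.Dict.counter ks).items.foldl rstep PySem.Dict.empty
      = (PySem.Dict.counter ks).items.foldl
          (fun c p => c.modify p.1.1 PySem.Dict.empty (fun inner => inner.insert p.1.2 p.2))
          PySem.Dict.empty := rfl
  have hnd : ((PySem.Dict.counter ks).items.foldl rstep PySem.Dict.empty).keys.Nodup := by
    rw [h0]
    exact PySem.Dict.nodup_keys_foldl_modify_key (PySem.Dict.counter ks).items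
      (fun (p : (String × String) × Int) => p.1.1) PySem.Dict.empty
      (fun (_ : PySem.Dict String (PySem.Dict String Int)) (p : (String × String) × Int)
        (inner : PySem.Dict String Int) => inner.insert p.1.2 p.2) PySem.Dict.empty (by simp)
  have hkeys : ((PySem.Dict.counter ks).items.foldl rstep PySem.Dict.empty).keys
      = PySem.Set.ofList (ks.map Prod.fst) := by
    rw [h0]
    have h1 := PySem.Dict.keys_foldl_modify_key (PySem.Dict.counter ks).items
      (fun (p : (String × String) × Int) => p.1.1) PySem.Dict.empty
      (fun (_ : PySem.Dict String (PySem.Dict String Int)) (p : (String × String) × Int)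
        (inner : PySem.Dict String Int) => inner.insert p.1.2 p.2) PySem.Dict.empty
    rw [h1, hitems, List.map_map]
    have hcomp : ((fun p => p.1.1) ∘ fun k => (k, (ks.count k : Int))) = Prod.fst := rfl
    rw [hcomp]
    simpa [PySem.Set.update_nil_left] using ofList_map_ofList Prod.fst ks
  rw [PySem.Dict.items_eq_map_keys _ hnd PySem.Dict.empty, List.map_map, hkeys]
  unfold closedForm
  apply List.map_congr_left
  intro s hs
  simp only [Function.comp]
  rw [getD_foldl_rstep, PySem.Dict.getD_empty]
  congr 1
  have hM : ((PySem.Dict.counter ks).items.filter (fun p => p.1.1 == s)).map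
        (fun p => (p.1.2, p.2))
      = ((PySem.Set.ofList ks).filter (fun k => k.1 == s)).map
          (fun k => (k.2, (ks.count k : Int))) := by
    rw [hitems, List.filter_map, List.map_map]
    rfl
  have hM2 : ((PySem.Set.ofList ks).filter (fun k => k.1 == s)).map
        (fun k => (k.2, (ks.count k : Int)))
      = (PySem.Set.ofList (actOf ks s)).map
          (fun a => (a, ((actOf ks s).count a : Int))) := by
    rw [← filter_ofList_map_snd, List.map_map]
    apply List.map_congr_left
    intro k hk
    rcases List.mem_filter.mp hk with ⟨hkl, hks⟩
    have hks' : k.1 = s := by simpa using hks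
    have hkeq : k = (s, k.2) := Prod.ext hks' rfl
    simp only [Function.comp]
    rw [count_actOf, ← hkeq]
  rw [hM, hM2]
  have hfresh : ∀ q ∈ (PySem.Set.ofList (actOf ks s)).map
      (fun a => (a, ((actOf ks s).count a : Int))),
      (PySem.Dict.empty : PySem.Dict String Int).contains q.1 = false := by
    intro q hq
    exact PySem.Dict.contains_empty _
  have hndM : (((PySem.Set.ofList (actOf ks s)).map
      (fun a => (a, ((actOf ks s).count a : Int)))).map (fun q => q.1)).Nodup := by
    rw [List.map_map]
    have hcomp : ((fun q : String × Int => q.1) ∘ fun a => (a, ((actOf ks s).count a : Int)))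
        = id := rfl
    rw [hcomp, List.map_id]
    exact PySem.Set.nodup_ofList _
  rw [PySem.Dict.items_foldl_insert_fresh _ _ _ _ hfresh hndM, PySem.Dict.items_counter]
  simp [PySem.Dict.empty, Function.comp]

lemma portA_eq (entries : List (List (String × String))) :
    count_scene_actions_py entries
      = ((entries.map pvKey).foldl gA PySem.Dict.empty).items.map (fun p => (p.1, p.2.items)) := by
  unfold count_scene_actions_py
  rw [List.foldl_map]
  rfl

lemma portB_eq (entries : List (List (String × String))) :
    count_scene_actions_py_alt entries
      = ((PySem.Dict.counter (entries.map pvKey)).items.foldl rstep PySem.Dict.empty).items.map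
          (fun p => (p.1, p.2.items)) := by
  unfold count_scene_actions_py_alt
  rw [← PySem.Dict.foldl_insert_getD_add_one_eq_counter, List.foldl_map]
  rfl

-- ===== VERDICT (by name: the statement is the Claim_ definition above) =====
theorem count_scene_actions_py_spec : Claim_equal_count_scene_actions_py := by
  intro entries _
  show count_scene_actions_py entries = count_scene_actions_py_alt entries
  rw [portA_eq, portB_eq]
  have hg : (entries.map pvKey).foldl gA PySem.Dict.empty
      = (entries.map pvKey).foldl mstep PySem.Dict.empty := by
    apply PySem.List.foldl_congr_mem
    intro c k _
    exact gA_eq_mstep c k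
  rw [hg, A_closed, B_closed]
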